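-- pv_equiv track=rewrite | github.com/leiliu500/pdf_table_extraction | src/rag/text_processor.py | _group_form_fields
-- ===== SOURCE A (Python) =====
-- from typing import List, Dict, Any, Optional, Tuple
--
-- def _group_form_fields(fields: List[Dict[str, Any]]) -> Dict[str, List[Dict[str, Any]]]:
--     """
--     Group form fields by logical relationships
--     """
--     groups = {'general': []}
--
--     for field in fields:
--         field_name = field.get('name', '').lower()
--
--         # Simple grouping logic - can be enhanced
--         if any(keyword in field_name for keyword in ['name', 'first', 'last', 'full']):
--             if 'personal_info' not in groups:
--                 groups['personal_info'] = []
--             groups['personal_info'].append(field)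
--         elif any(keyword in field_name for keyword in ['address', 'street', 'city', 'state', 'zip']):
--             if 'address' not in groups:
--                 groups['address'] = []
--             groups['address'].append(field)
--         elif any(keyword in field_name for keyword in ['phone', 'email', 'contact']):
--             if 'contact' not in groups:
--                 groups['contact'] = []
--             groups['contact'].append(field)
--         else:
--             groups['general'].append(field)
--
--     # Remove empty groups
--     return {k: v for k, v in groups.items() if v}
-- ===== SOURCE B (Python) =====
-- CATEGORIES = [
--     ('personal_info', ['name', 'first', 'last', 'full']),
--     ('address', ['address', 'street', 'city', 'state', 'zip']),
--     ('contact', ['phone', 'email', 'contact']),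
-- ]
--
--
-- def _group_form_fields(fields):
--     """Group form fields by logical relationships (classify once, then gather)."""
--     def classify(field):
--         n = field.get('name', '').lower()
--         for cat, kws in CATEGORIES:
--             if any(k in n for k in kws):
--                 return cat
--         return 'general'
--
--     cats = [classify(f) for f in fields]
--     order = []
--     for c in cats:
--         if c != 'general' and c not in order:
--             order.append(c)
--     return {k: [f for f, c in zip(fields, cats) if c == k]
--             for k in ['general'] + order if k in cats}
-- ===== Notes on version B (the rewrite author's own statement) =====
-- stated objective: simpler
-- what changed: A builds the groups dict incrementally with per-branch key-creation and append; B classifies each field once against a keyword table, computes the first-occurrence key order, and builds each group by filtering the classified fields.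
import Mathlib
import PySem

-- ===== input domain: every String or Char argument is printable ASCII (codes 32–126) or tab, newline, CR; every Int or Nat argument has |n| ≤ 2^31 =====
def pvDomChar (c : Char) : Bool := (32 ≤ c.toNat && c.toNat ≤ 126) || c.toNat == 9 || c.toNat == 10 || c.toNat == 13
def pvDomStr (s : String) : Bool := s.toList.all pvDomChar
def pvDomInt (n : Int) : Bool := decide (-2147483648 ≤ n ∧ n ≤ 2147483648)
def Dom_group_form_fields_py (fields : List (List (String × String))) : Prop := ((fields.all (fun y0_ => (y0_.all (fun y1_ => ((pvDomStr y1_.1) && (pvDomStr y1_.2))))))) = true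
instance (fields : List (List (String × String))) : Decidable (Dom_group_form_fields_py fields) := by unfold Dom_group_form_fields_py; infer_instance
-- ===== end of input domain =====

-- B classifies each field once against a keyword table,
-- then builds each group by filtering, instead of A's incremental dict of appended lists (simpler, same cost).

-- ===== PORT A =====
-- loop body of A's `for field in fields`, named for the proofs; a literal transliteration of A's branches
def pvAStep (g : PySem.Dict String (List (List (String × String)))) (f : List (String × String)) :
    PySem.Dict String (List (List (String × String))) :=
  let fn := PySem.Str.lower (PySem.Dict.getD (PySem.Dict.mk f) "name" "")
  if ["name", "first", "last", "full"].any (fun kw => PySem.Str.isIn kw fn) then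
    let g := if !(g.contains "personal_info") then g.insert "personal_info" [] else g
    g.modify "personal_info" [] (fun v => v ++ [f])
  else if ["address", "street", "city", "state", "zip"].any (fun kw => PySem.Str.isIn kw fn) then
    let g := if !(g.contains "address") then g.insert "address" [] else g
    g.modify "address" [] (fun v => v ++ [f])
  else if ["phone", "email", "contact"].any (fun kw => PySem.Str.isIn kw fn) then
    let g := if !(g.contains "contact") then g.insert "contact" [] else g
    g.modify "contact" [] (fun v => v ++ [f])
  else
    g.modify "general" [] (fun v => v ++ [f])

def group_form_fields_py (fields : List (List (String × String))) :
    List (String × List (List (String × String))) :=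
  let groups : PySem.Dict String (List (List (String × String))) := PySem.Dict.mk [("general", [])]
  let groups := fields.foldl pvAStep groups
  groups.items.filter (fun kv => !kv.2.isEmpty)

-- ===== PORT B =====
def pvCategories : List (String × List String) :=
  [("personal_info", ["name", "first", "last", "full"]),
   ("address", ["address", "street", "city", "state", "zip"]),
   ("contact", ["phone", "email", "contact"])]

-- B's helper `classify`
def pvClassify (f : List (String × String)) : String :=
  let n := PySem.Str.lower (PySem.Dict.getD (PySem.Dict.mk f) "name" "")
  match pvCategories.find? (fun ck => ck.2.any (fun kw => PySem.Str.isIn kw n)) with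
  | some ck => ck.1
  | none => "general"

def group_form_fields_py_alt (fields : List (List (String × String))) :
    List (String × List (List (String × String))) :=
  let cats := fields.map pvClassify
  let order := cats.foldl (fun ord c => if c != "general" && !(ord.contains c) then ord ++ [c] else ord) []
  (("general" :: order).filter (fun k => cats.contains k)).map
    (fun k => (k, ((fields.zip cats).filter (fun p => p.2 == k)).map (fun p => p.1)))

-- ===== PRECONDITION & SPEC =====
def Spec_group_form_fields_py (fields : List (List (String × String))) (out : List (String × List (List (String × String)))) : Prop := out = group_form_fields_py_alt fields
instance (fields : List (List (String × String))) (out : List (String × List (List (String × String)))) : Decidable (Spec_group_form_fields_py fields out) := by unfold Spec_group_form_fields_py; infer_instance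

-- ===== CLAIM (what is proved, stated in full; the proofs are below) =====
def Claim_equal_group_form_fields_py : Prop := ∀ (fields : List (List (String × String))), Dom_group_form_fields_py fields → Spec_group_form_fields_py fields (group_form_fields_py fields)

-- ===== LEMMAS AND PROOFS =====

-- the group a key collects, and the first-occurrence order of the non-"general" keys
def pvGather (k : String) (l : List (List (String × String))) : List (List (String × String)) :=
  l.filter (fun f => pvClassify f == k)

def pvOrd (l : List (List (String × String))) : List String :=
  (l.map pvClassify).foldl (fun ord c => if c != "general" && !(ord.contains c) then ord ++ [c] else ord) []

theorem pvFind_aux (n : String) :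
    (match pvCategories.find? (fun ck => ck.2.any (fun kw => PySem.Str.isIn kw n)) with
     | some ck => ck.1 | none => "general") =
    (if ["name", "first", "last", "full"].any (fun kw => PySem.Str.isIn kw n) then "personal_info"
     else if ["address", "street", "city", "state", "zip"].any (fun kw => PySem.Str.isIn kw n) then "address"
     else if ["phone", "email", "contact"].any (fun kw => PySem.Str.isIn kw n) then "contact"
     else "general") := by
  cases h1 : ["name", "first", "last", "full"].any (fun kw => PySem.Str.isIn kw n) <;>
  cases h2 : ["address", "street", "city", "state", "zip"].any (fun kw => PySem.Str.isIn kw n) <;>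
  cases h3 : ["phone", "email", "contact"].any (fun kw => PySem.Str.isIn kw n) <;>
  simp only [pvCategories, List.find?, h1, h2, h3, Bool.false_eq_true, if_true, if_false]

theorem pvClassify_cases (f : List (String × String)) :
    pvClassify f =
      (if ["name", "first", "last", "full"].any (fun kw => PySem.Str.isIn kw (PySem.Str.lower (PySem.Dict.getD (PySem.Dict.mk f) "name" ""))) then "personal_info"
       else if ["address", "street", "city", "state", "zip"].any (fun kw => PySem.Str.isIn kw (PySem.Str.lower (PySem.Dict.getD (PySem.Dict.mk f) "name" ""))) then "address"
       else if ["phone", "email", "contact"].any (fun kw => PySem.Str.isIn kw (PySem.Str.lower (PySem.Dict.getD (PySem.Dict.mk f) "name" ""))) then "contact"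
       else "general") :=
  pvFind_aux _

theorem mem_ordFoldl (cs : List String) (acc : List String) (k : String) :
    k ∈ cs.foldl (fun ord c => if c != "general" && !(ord.contains c) then ord ++ [c] else ord) acc ↔
      k ∈ acc ∨ (k ≠ "general" ∧ k ∈ cs) := by
  induction cs generalizing acc with
  | nil => simp
  | cons c cs ih =>
    simp only [List.foldl_cons, ih, List.mem_cons]
    by_cases hc : (c != "general" && !(acc.contains c)) = true
    · rw [if_pos hc]
      simp only [bne_iff_ne, Bool.and_eq_true, Bool.not_eq_true', ne_eq,
        List.contains_eq_mem, decide_eq_false_iff_not] at hc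
      by_cases hk : k = c
      · subst hk
        simp [List.mem_append, hc.1]
      · simp only [List.mem_append, List.mem_singleton, hk, or_false]
        tauto
    · rw [if_neg hc]
      simp only [bne_iff_ne, Bool.and_eq_true, Bool.not_eq_true', ne_eq,
        List.contains_eq_mem, decide_eq_false_iff_not, not_and, not_not] at hc
      by_cases hk : k = c
      · subst hk
        constructor
        · tauto
        · rintro (h | ⟨hg, _⟩)
          · exact Or.inl h
          · exact Or.inl (hc hg)
      · tauto

theorem mem_pvOrd (l : List (List (String × String))) (k : String) :
    k ∈ pvOrd l ↔ (k ≠ "general" ∧ k ∈ l.map pvClassify) := by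
  unfold pvOrd
  rw [mem_ordFoldl]
  simp

theorem gen_not_mem_pvOrd (l : List (List (String × String))) : "general" ∉ pvOrd l := by
  rw [mem_pvOrd]
  simp

theorem pvOrd_append (l : List (List (String × String))) (f : List (String × String)) :
    pvOrd (l ++ [f]) =
      (if pvClassify f != "general" && !((pvOrd l).contains (pvClassify f))
       then pvOrd l ++ [pvClassify f] else pvOrd l) := by
  unfold pvOrd
  rw [List.map_append, List.foldl_append]
  rfl

theorem pvGather_append (k : String) (l : List (List (String × String))) (f : List (String × String)) :
    pvGather k (l ++ [f]) = pvGather k l ++ (if pvClassify f == k then [f] else []) := by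
  unfold pvGather
  rw [List.filter_append]
  cases h : pvClassify f == k <;> simp [h]

theorem pvGather_eq_nil (k : String) (l : List (List (String × String)))
    (h : k ∉ l.map pvClassify) : pvGather k l = [] := by
  unfold pvGather
  rw [List.filter_eq_nil_iff]
  intro f hf
  simp only [beq_iff_eq]
  exact fun he => h (he ▸ List.mem_map_of_mem hf)

theorem pvGather_ne_nil (k : String) (l : List (List (String × String)))
    (h : k ∈ l.map pvClassify) : pvGather k l ≠ [] := by
  rcases List.mem_map.mp h with ⟨f, hf, he⟩
  unfold pvGather
  intro hnil
  have : f ∈ l.filter (fun f => pvClassify f == k) := List.mem_filter.mpr ⟨hf, by simp [he]⟩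
  rw [hnil] at this
  exact absurd this (List.not_mem_nil)

theorem find_map_of_mem {α : Type} (c : String) (ord : List String) (v : String → List α)
    (h : c ∈ ord) :
    List.find? (fun p => p.1 == c) (ord.map (fun k => (k, v k))) = some (c, v c) := by
  induction ord with
  | nil => simp at h
  | cons k ord ih =>
    by_cases hk : k = c
    · subst hk; simp [List.find?]
    · have hco : c ∈ ord := by
        rcases List.mem_cons.mp h with h' | h'
        · exact absurd h'.symm hk
        · exact h'
      simp [List.find?, hk, ih hco]

theorem find_map_of_not_mem {α : Type} (c : String) (ord : List String) (v : String → List α)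
    (h : c ∉ ord) :
    List.find? (fun p => p.1 == c) (ord.map (fun k => (k, v k))) = none := by
  rw [List.find?_eq_none]
  rintro ⟨k, w⟩ hp
  rcases List.mem_map.mp hp with ⟨k', hk', heq⟩
  cases heq
  simp only [beq_iff_eq]
  exact fun hh => h (hh ▸ hk')

theorem dict_gen_items {α : Type} (G : List α) (ord : List String) (v : String → List α)
    (hgord : "general" ∉ ord) (f : α) :
    ((PySem.Dict.mk (("general", G) :: ord.map (fun k => (k, v k)))).modify "general" [] (fun x => x ++ [f])).items =
      ("general", G ++ [f]) :: ord.map (fun k => (k, v k)) := by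
  simp only [PySem.Dict.modify, PySem.Dict.insert, PySem.Dict.getD, PySem.Dict.get?,
    PySem.Dict.contains, List.any_cons, List.find?]
  simp only [beq_self_eq_true, Bool.true_or, Option.map_some, Option.getD_some, if_pos,
    List.map_cons, List.map_map]
  refine congrArg _ ?_
  apply List.map_congr_left
  intro k hk
  have hkg : k ≠ "general" := fun h => hgord (h ▸ hk)
  simp [hkg]

theorem dict_add_items {α : Type} (c : String) (hcg : c ≠ "general") (G : List α) (ord : List String)
    (v : String → List α) (f : α) :
    ((if !((PySem.Dict.mk (("general", G) :: ord.map (fun k => (k, v k)))).contains c)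
      then (PySem.Dict.mk (("general", G) :: ord.map (fun k => (k, v k)))).insert c ([] : List α)
      else PySem.Dict.mk (("general", G) :: ord.map (fun k => (k, v k)))).modify c [] (fun x => x ++ [f])).items =
      (if c ∈ ord then
        ("general", G) :: ord.map (fun k => (k, if k = c then v k ++ [f] else v k))
       else ("general", G) :: (ord.map (fun k => (k, v k)) ++ [(c, [f])])) := by
  have hgc : (("general" : String) == c) = false := by simp [Ne.symm hcg]
  by_cases hmem : c ∈ ord
  · have hcont : (PySem.Dict.mk (("general", G) :: ord.map (fun k => (k, v k)))).contains c = true := by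
      simp only [PySem.Dict.contains, PySem.Dict.items, List.any_cons, hgc, Bool.false_or, List.any_map]
      rw [List.any_eq_true]
      exact ⟨c, hmem, by simp⟩
    rw [hcont]
    simp only [Bool.not_true, if_neg (by simp : ¬ (false = true))]
    simp only [PySem.Dict.modify, PySem.Dict.getD, PySem.Dict.get?, PySem.Dict.items, List.find?,
      hgc, find_map_of_mem c ord v hmem, Option.map_some, Option.getD_some]
    simp only [PySem.Dict.insert, hcont, if_pos, PySem.Dict.items, List.map_cons, hgc,
      Bool.false_eq_true, if_neg, List.map_map, if_pos hmem]
    refine congrArg _ ?_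
    apply List.map_congr_left
    intro k _
    by_cases hk : k = c
    · subst hk; simp
    · simp [hk]
  · have hcont : (PySem.Dict.mk (("general", G) :: ord.map (fun k => (k, v k)))).contains c = false := by
      simp only [PySem.Dict.contains, PySem.Dict.items, List.any_cons, hgc, Bool.false_or, List.any_map]
      rw [List.any_eq_false]
      intro k hk
      simp only [Function.comp]
      simp only [beq_iff_eq]
      exact fun hh => hmem (hh ▸ hk)
    rw [hcont]
    simp only [Bool.not_false, if_pos]
    have h1 : (PySem.Dict.mk (("general", G) :: ord.map (fun k => (k, v k)))).insert c ([] : List α)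
        = PySem.Dict.mk ((("general", G) :: ord.map (fun k => (k, v k))) ++ [(c, [])]) :=
      PySem.Dict.ext (PySem.Dict.items_insert_of_not_contains _ _ hcont)
    rw [h1]
    simp only [PySem.Dict.modify, PySem.Dict.getD, PySem.Dict.get?, PySem.Dict.items]
    rw [List.cons_append, List.find?_cons_of_neg (by simpa using hgc), List.find?_append,
      find_map_of_not_mem c ord v hmem]
    simp only [Option.none_or, List.find?, beq_self_eq_true, Option.map_some, Option.getD_some]
    simp only [PySem.Dict.insert, PySem.Dict.contains, PySem.Dict.items]
    simp [hgc, Ne.symm hcg, if_neg hmem]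
    intro k hk hkc
    exact absurd (hkc ▸ hk) hmem

theorem rhs_add (l : List (List (String × String))) (f : List (String × String)) (c : String)
    (hcg : c ≠ "general") (hc : pvClassify f = c) :
    (if c ∈ pvOrd l then
       ("general", pvGather "general" l) :: (pvOrd l).map (fun k => (k, if k = c then pvGather k l ++ [f] else pvGather k l))
     else ("general", pvGather "general" l) :: ((pvOrd l).map (fun k => (k, pvGather k l)) ++ [(c, [f])])) =
    ("general", pvGather "general" (l ++ [f])) :: (pvOrd (l ++ [f])).map (fun k => (k, pvGather k (l ++ [f]))) := by
  have hg : pvGather "general" (l ++ [f]) = pvGather "general" l := by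
    rw [pvGather_append]
    simp [hc, hcg]
  have hgath : ∀ k, pvGather k (l ++ [f]) = pvGather k l ++ (if k = c then [f] else []) := by
    intro k
    rw [pvGather_append, hc]
    by_cases hk : k = c
    · simp [hk]
    · simp [hk, Ne.symm hk]
  rw [pvOrd_append, hc]
  by_cases hmem : c ∈ pvOrd l
  · have : (c != "general" && !((pvOrd l).contains c)) = false := by
      simp [List.contains_eq_mem, hmem]
    rw [this]
    simp only [Bool.false_eq_true, if_false, if_pos hmem, hg]
    refine congrArg _ ?_
    apply List.map_congr_left
    intro k _
    rw [hgath k]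
    by_cases hk : k = c
    · simp [hk]
    · simp [hk]
  · have : (c != "general" && !((pvOrd l).contains c)) = true := by
      simp [List.contains_eq_mem, hmem, hcg]
    rw [this]
    simp only [if_true, if_neg hmem, hg]
    refine congrArg _ ?_
    rw [List.map_append]
    refine congrArg₂ _ ?_ ?_
    · apply List.map_congr_left
      intro k hk
      rw [hgath k]
      have hkc : k ≠ c := fun hh => hmem (hh ▸ hk)
      simp [hkc]
    · simp only [List.map_cons, List.map_nil, hgath c]
      have : pvGather c l = [] := by
        apply pvGather_eq_nil
        intro hmm
        exact hmem ((mem_pvOrd l c).mpr ⟨hcg, hmm⟩)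
      simp [this]

theorem rhs_gen (l : List (List (String × String))) (f : List (String × String))
    (hc : pvClassify f = "general") :
    ("general", pvGather "general" l ++ [f]) :: (pvOrd l).map (fun k => (k, pvGather k l)) =
    ("general", pvGather "general" (l ++ [f])) :: (pvOrd (l ++ [f])).map (fun k => (k, pvGather k (l ++ [f]))) := by
  have hord : pvOrd (l ++ [f]) = pvOrd l := by
    rw [pvOrd_append, hc]
    simp
  have hg : pvGather "general" (l ++ [f]) = pvGather "general" l ++ [f] := by
    rw [pvGather_append]
    simp [hc]
  rw [hord, hg]
  refine congrArg _ ?_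
  apply List.map_congr_left
  intro k hk
  rw [pvGather_append, hc]
  have : k ≠ "general" := ((mem_pvOrd l k).mp hk).1
  simp [Ne.symm this]

theorem pvA_items (l : List (List (String × String))) :
    (l.foldl pvAStep (PySem.Dict.mk [("general", [])])).items =
      ("general", pvGather "general" l) :: (pvOrd l).map (fun k => (k, pvGather k l)) := by
  induction l using List.reverseRecOn with
  | nil => rfl
  | append_singleton l f ih =>
    rw [List.foldl_append, List.foldl_cons, List.foldl_nil]
    have hd : l.foldl pvAStep (PySem.Dict.mk [("general", [])]) =
        PySem.Dict.mk (("general", pvGather "general" l) :: (pvOrd l).map (fun k => (k, pvGather k l))) :=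
      PySem.Dict.ext ih
    rw [hd]
    simp only [pvAStep]
    cases h1 : ["name", "first", "last", "full"].any (fun kw => PySem.Str.isIn kw (PySem.Str.lower (PySem.Dict.getD (PySem.Dict.mk f) "name" "")))
    · cases h2 : ["address", "street", "city", "state", "zip"].any (fun kw => PySem.Str.isIn kw (PySem.Str.lower (PySem.Dict.getD (PySem.Dict.mk f) "name" "")))
      · cases h3 : ["phone", "email", "contact"].any (fun kw => PySem.Str.isIn kw (PySem.Str.lower (PySem.Dict.getD (PySem.Dict.mk f) "name" "")))
        · have hc : pvClassify f = "general" := by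
            rw [pvClassify_cases f, h1, h2, h3]
            simp
          simp only [Bool.false_eq_true, if_false]
          rw [dict_gen_items _ _ _ (gen_not_mem_pvOrd l) f, rhs_gen l f hc]
        · have hc : pvClassify f = "contact" := by
            rw [pvClassify_cases f, h1, h2, h3]
            simp
          simp only [Bool.false_eq_true, if_false, if_true]
          rw [dict_add_items "contact" (by decide) _ _ _ f, rhs_add l f "contact" (by decide) hc]
      · have hc : pvClassify f = "address" := by
          rw [pvClassify_cases f, h1, h2]
          simp
        simp only [Bool.false_eq_true, if_false, if_true]
        rw [dict_add_items "address" (by decide) _ _ _ f, rhs_add l f "address" (by decide) hc]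
    · have hc : pvClassify f = "personal_info" := by
        rw [pvClassify_cases f, h1]
        simp
      simp only [if_true]
      rw [dict_add_items "personal_info" (by decide) _ _ _ f, rhs_add l f "personal_info" (by decide) hc]

theorem pvZipFilter (l : List (List (String × String))) (k : String) :
    ((l.zip (l.map pvClassify)).filter (fun p => p.2 == k)).map (fun p => p.1) = pvGather k l := by
  induction l with
  | nil => rfl
  | cons f l ih =>
    simp only [List.map_cons, List.zip_cons_cons, List.filter_cons]
    by_cases hk : (pvClassify f == k) = true
    · simp only [hk, if_true, List.map_cons, ih]
      unfold pvGather
      simp [List.filter_cons, hk]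
    · simp only [hk, Bool.false_eq_true, if_false, ih]
      unfold pvGather
      simp only [List.filter_cons]
      rw [if_neg (by simpa using hk)]

theorem pvGen_contains (l : List (List (String × String))) :
    (!(pvGather "general" l).isEmpty) = ((l.map pvClassify).contains "general") := by
  by_cases h : "general" ∈ l.map pvClassify
  · have := pvGather_ne_nil "general" l h
    simp [List.contains_eq_mem, h, List.isEmpty_iff, this]
  · have := pvGather_eq_nil "general" l h
    simp [List.contains_eq_mem, h, this]

-- ===== VERDICT (by name: the statement is the Claim_ definition above) =====
set_option maxHeartbeats 1000000 in
theorem group_form_fields_py_spec : Claim_equal_group_form_fields_py := by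
  intro fields _
  simp only [Spec_group_form_fields_py, group_form_fields_py, group_form_fields_py_alt]
  rw [pvA_items fields]
  have horder : (fields.map pvClassify).foldl
      (fun ord c => if c != "general" && !(ord.contains c) then ord ++ [c] else ord) [] = pvOrd fields := rfl
  rw [horder]
  simp only [List.filter_cons]
  have hM : ((pvOrd fields).map (fun k => (k, pvGather k fields))).filter (fun kv => !kv.2.isEmpty)
      = (pvOrd fields).map (fun k => (k, pvGather k fields)) := by
    rw [List.filter_eq_self]
    intro kv hkv
    rcases List.mem_map.mp hkv with ⟨k', hk', heq⟩
    subst heq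
    have hne : pvGather k' fields ≠ [] :=
      pvGather_ne_nil k' fields ((mem_pvOrd fields k').mp hk').2
    simpa [List.isEmpty_iff] using hne
  have hof : (pvOrd fields).filter (fun k => (fields.map pvClassify).contains k) = pvOrd fields := by
    rw [List.filter_eq_self]
    intro k hk
    simp [List.contains_eq_mem, ((mem_pvOrd fields k).mp hk).2]
  rw [hM, hof]
  rw [pvGen_contains fields]
  by_cases hg : ((fields.map pvClassify).contains "general") = true
  · rw [hg]
    simp only [if_true, List.map_cons]
    refine congrArg₂ _ ?_ ?_
    · rw [pvZipFilter]
    · symm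
      apply List.map_congr_left
      intro k _
      rw [pvZipFilter]
  · rw [Bool.not_eq_true] at hg
    rw [hg]
    simp only [Bool.false_eq_true, if_false]
    symm
    apply List.map_congr_left
    intro k _
    rw [pvZipFilter]
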